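-- pv_equiv track=rewrite | github.com/nOOne-is-hier/TIS | programmers/APS/징검다리/징검다리.py | solution
-- ===== SOURCE A (Python) =====
-- from heapq import heappop, heappush
--
-- def solution(distance, rocks, n):
--     num_of_rocks = len(rocks)
--     distance_changes = []
--     sorted_rocks = [0] + sorted(rocks) + [distance]
--     for idx in range(1, num_of_rocks + 2):
--         current_distance = sorted_rocks[idx] - sorted_rocks[idx - 1]
--         heappush(distance_changes, current_distance)
--
--     for _ in range(num_of_rocks - n + 1):
--         smallest_distance = heappop(distance_changes)
--
--     return smallest_distance
-- ===== SOURCE B (Python) =====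
-- def solution(distance, rocks, n):
--     sorted_rocks = [0] + sorted(rocks) + [distance]
--     gaps = sorted(b - a for a, b in zip(sorted_rocks, sorted_rocks[1:]))
--     return gaps[len(rocks) - n]
-- ===== Notes on version B (the rewrite author's own statement) =====
-- stated objective: simpler
-- what changed: A pushes every consecutive gap onto a heap and pops it num_of_rocks-n+1 times to reach the k-th smallest gap; B sorts the gap list once and indexes it directly at position len(rocks)-n.
import Mathlib
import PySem

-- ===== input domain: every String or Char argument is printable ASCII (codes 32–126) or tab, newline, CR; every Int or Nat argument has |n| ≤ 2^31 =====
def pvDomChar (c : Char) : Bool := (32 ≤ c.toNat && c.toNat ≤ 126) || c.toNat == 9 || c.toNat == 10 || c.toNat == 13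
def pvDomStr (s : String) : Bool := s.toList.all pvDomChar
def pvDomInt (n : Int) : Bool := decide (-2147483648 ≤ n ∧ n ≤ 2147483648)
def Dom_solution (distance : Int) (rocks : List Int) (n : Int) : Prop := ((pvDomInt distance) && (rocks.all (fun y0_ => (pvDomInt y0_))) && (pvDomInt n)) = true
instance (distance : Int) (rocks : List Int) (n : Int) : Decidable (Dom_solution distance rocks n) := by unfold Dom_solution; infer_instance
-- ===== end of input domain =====

-- B replaces A's heap (push all gaps, pop k times) by sort-the-gaps-once and index the k-th smallest directly.

-- ===== PORT A =====
-- heapq has no PySem primitive; the heap is ported by hand as the ascending list of its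
-- elements: heappush = ordered insert (insertBy), heappop = take the head.  This is exact
-- here: the heap holds Ints and its only observable use is that heappop returns the minimum.
def solution (distance : Int) (rocks : List Int) (n : Int) : Int :=
  let numOfRocks : Int := PySem.List.len rocks
  let sortedRocks : List Int := 0 :: PySem.List.sorted rocks (fun x => x) false ++ [distance]
  -- pyGetD with default 0 is exact: idx and idx-1 are always in range for this list
  let heap : List Int := (PySem.List.pyRange 1 (numOfRocks + 2)).foldl
      (fun acc idx =>
        PySem.List.insertBy (fun a b => decide (a < b))
          (PySem.List.pyGetD sortedRocks idx 0 - PySem.List.pyGetD sortedRocks (idx - 1) 0) acc) []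
  let final := (PySem.List.pyRange 0 (numOfRocks - n + 1)).foldl
      (fun st _ => match st.1 with | [] => st | h :: t => (t, some h))
      ((heap, none) : List Int × Option Int)
  -- `none` = Python's unbound smallest_distance (A raises there; excluded by Pre_); .getD 0 totalises
  final.2.getD 0

-- ===== PORT B =====
def solution_alt (distance : Int) (rocks : List Int) (n : Int) : Int :=
  let sortedRocks : List Int := 0 :: PySem.List.sorted rocks (fun x => x) false ++ [distance]
  let gaps : List Int := PySem.List.sorted
      ((sortedRocks.zip (PySem.List.slice sortedRocks (some 1) none)).map (fun p => p.2 - p.1))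
      (fun x => x) false
  -- pyGet? none = Python IndexError (outside Pre_); .getD 0 totalises
  (PySem.List.pyGet? gaps (PySem.List.len rocks - n)).getD 0

-- ===== PRECONDITION & SPEC =====
-- Pre_ excludes exactly the inputs where A raises: n > len(rocks) → zero pops, UnboundLocalError;
-- n < 0 → more pops than gaps, IndexError from heappop.
def Pre_solution (distance : Int) (rocks : List Int) (n : Int) : Prop :=
  0 ≤ n ∧ n ≤ rocks.length
instance (distance : Int) (rocks : List Int) (n : Int) : Decidable (Pre_solution distance rocks n) := by
  unfold Pre_solution; infer_instance
def pvWitness_solution : Int × List Int × Int := (25, ([2, 14, 11, 21, 17] : List Int), 2)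

def Spec_solution (distance : Int) (rocks : List Int) (n : Int) (out : Int) : Prop :=
  out = solution_alt distance rocks n
instance (distance : Int) (rocks : List Int) (n : Int) (out : Int) : Decidable (Spec_solution distance rocks n out) := by
  unfold Spec_solution; infer_instance

-- ===== CLAIM (what is proved, stated in full; the proofs are below) =====
def Claim_equal_solution : Prop := ∀ (distance : Int) (rocks : List Int) (n : Int), Dom_solution distance rocks n → Pre_solution distance rocks n → Spec_solution distance rocks n (solution distance rocks n)

-- ===== LEMMAS AND PROOFS =====

-- consecutive differences by index = consecutive differences by zipping with the tail
lemma consec_diffs (s : List Int) :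
    (List.range (s.length - 1)).map (fun k => s.getD (k + 1) 0 - s.getD k 0)
      = (s.zip s.tail).map (fun p => p.2 - p.1) := by
  induction s with
  | nil => rfl
  | cons a t ih =>
    cases t with
    | nil => rfl
    | cons b t' =>
      simp only [List.length_cons, Nat.add_sub_cancel, List.range_succ_eq_map,
        List.map_cons, List.map_map, List.tail_cons, List.zip_cons_cons]
      refine congrArg₂ List.cons ?_ ?_
      · norm_num
      · have := ih
        simp only [List.length_cons, Nat.add_sub_cancel, List.tail_cons] at this
        rw [← this]
        apply List.map_congr_left
        intro k _
        simp

-- A's indexed gap list over range(1, len(s)) equals the zip form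
lemma gaps_raw_eq (s : List Int) :
    (PySem.List.pyRange 1 (s.length : Int)).map
        (fun idx => PySem.List.pyGetD s idx 0 - PySem.List.pyGetD s (idx - 1) 0)
      = (s.zip s.tail).map (fun p => p.2 - p.1) := by
  rw [PySem.List.pyRange_one, List.map_map]
  have hlen : ((s.length : Int) - 1).toNat = s.length - 1 := by omega
  rw [hlen, ← consec_diffs s]
  apply List.map_congr_left
  intro k _
  have h1 : (1 : Int) + (k : Int) = ((k + 1 : Nat) : Int) := by push_cast; ring
  have h2 : ((k + 1 : Nat) : Int) - 1 = ((k : Nat) : Int) := by push_cast; ring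
  simp only [Function.comp, h1, h2, PySem.List.pyGetD_natCast]

-- popping c times from L (fold over any index list of length c)
lemma pop_fold (l : List Int) : ∀ (L : List Int) (sm : Option Int), l.length ≤ L.length →
    l.foldl (fun st _ => match st.1 with | [] => st | h :: t => (t, some h))
        ((L, sm) : List Int × Option Int)
      = (L.drop l.length, if l.length = 0 then sm else L[l.length - 1]?) := by
  induction l with
  | nil => intro L sm _; simp
  | cons x l' ih =>
    intro L sm h
    cases L with
    | nil => simp at h
    | cons y L' =>
      simp only [List.foldl_cons]
      have h' : l'.length ≤ L'.length := by simpa using h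
      rw [ih L' (some y) h']
      cases hl : l'.length with
      | zero => simp [hl]
      | succ m => simp [hl, List.getElem?_cons_succ]

-- ===== VERDICT (by name: the statement is the Claim_ definition above) =====

theorem solution_spec : Claim_equal_solution := by
  intro distance rocks n _ hpre
  obtain ⟨hn0, hnle⟩ := hpre
  unfold Spec_solution solution solution_alt
  simp only [PySem.List.len_eq, PySem.List.slice_from_one]
  set sr := PySem.List.sorted rocks (fun x => x) false with hsr
  set s : List Int := 0 :: sr ++ [distance] with hs
  have hsrlen : sr.length = rocks.length := (PySem.List.sorted_perm rocks (fun x => x) false).length_eq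
  have hslen : s.length = rocks.length + 2 := by simp [hs, hsrlen]
  -- the gap lists agree
  have hrange : (rocks.length : Int) + 2 = (s.length : Int) := by rw [hslen]; push_cast; ring
  have hgaps :
      (PySem.List.pyRange 1 ((rocks.length : Int) + 2)).foldl
          (fun acc idx =>
            PySem.List.insertBy (fun a b => decide (a < b))
              (PySem.List.pyGetD s idx 0 - PySem.List.pyGetD s (idx - 1) 0) acc) []
        = PySem.List.sorted ((s.zip s.tail).map (fun p => p.2 - p.1)) (fun x => x) false := by
    rw [hrange, PySem.List.sorted_eq_foldl_insertBy, ← gaps_raw_eq s, List.foldl_map]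
  rw [hgaps]
  set L := PySem.List.sorted ((s.zip s.tail).map (fun p => p.2 - p.1)) (fun x => x) false with hL
  have hLlen : L.length = rocks.length + 1 := by
    have := (PySem.List.sorted_perm ((s.zip s.tail).map (fun p => p.2 - p.1)) (fun x => x) false).length_eq
    rw [hL, this]
    simp [hs, hsrlen]
  -- the pop loop
  have hc : (PySem.List.pyRange 0 ((rocks.length : Int) - n + 1)).length = (rocks.length : Int).toNat - n.toNat + 1 := by
    rw [PySem.List.length_pyRange_one]; omega
  have hcle : (rocks.length : Int).toNat - n.toNat + 1 ≤ L.length := by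
    rw [hLlen]; omega
  rw [pop_fold _ _ none (by rw [hc]; exact hcle)]
  simp only [hc]
  have hne : (rocks.length : Int).toNat - n.toNat + 1 ≠ 0 := by omega
  rw [if_neg hne]
  rw [PySem.List.pyGet?_of_nonneg L (by omega : (0:Int) ≤ (rocks.length : Int) - n)]
  have hidx : (rocks.length : Int).toNat - n.toNat + 1 - 1 = ((rocks.length : Int) - n).toNat := by omega
  rw [hidx]
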